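-- pv_equiv track=rewrite | github.com/bamyangang22/Algorithm_Study | SWEA/D2/4865. ［S／W 문제해결 기본］ 3일차 － 글자수/［S／W 문제해결 기본］ 3일차 － 글자수.py | solution
-- ===== SOURCE A (Python) =====
-- def solution(str1, str2):
--     hash = {}
--     #str1에 존재하는 알파벳 중복 제거하여 value값 0으로 초기화한 상태로 해시 생성
--     for ch in str1:
--         hash[ch] = 0
--
--     for ch in str2:
--         if ch in hash:
--             hash[ch] += 1
--
--     max_val = 0
--     for count in hash.values():
--         if count > max_val:
--             max_val = count
--     return max_val
-- ===== SOURCE B (Python) =====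
-- def solution(str1, str2):
--     return max((str2.count(ch) for ch in set(str1)), default=0)
-- ===== Notes on version B (the rewrite author's own statement) =====
-- stated objective: idiomatic
-- what changed: Replaces the three explicit loops (build a zero-initialised dict over str1, count str2 occurrences into it, scan the values for the maximum) by a single max over the distinct characters of str1 of str2.count(ch), scanning str2 per distinct character instead of maintaining a counting table.
import Mathlib
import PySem

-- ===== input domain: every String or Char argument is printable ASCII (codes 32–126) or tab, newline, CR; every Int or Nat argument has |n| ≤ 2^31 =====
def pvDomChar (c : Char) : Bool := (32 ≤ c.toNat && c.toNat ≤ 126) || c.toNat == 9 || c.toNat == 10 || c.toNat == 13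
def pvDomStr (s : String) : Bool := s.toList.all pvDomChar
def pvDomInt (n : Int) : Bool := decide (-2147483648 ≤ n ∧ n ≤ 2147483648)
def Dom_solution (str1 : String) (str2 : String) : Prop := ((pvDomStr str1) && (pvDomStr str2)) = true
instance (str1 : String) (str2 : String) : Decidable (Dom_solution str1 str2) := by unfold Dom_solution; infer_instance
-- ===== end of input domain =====

-- B replaces A's three explicit loops (zero-initialised dict, counting pass, value scan) by the
-- idiomatic one-liner max((str2.count(ch) for ch in set(str1)), default=0).

-- ===== PORT A =====
def solution (str1 : String) (str2 : String) : Int :=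
  let hash : PySem.Dict Char Int :=
    str1.toList.foldl (fun d ch => d.insert ch 0) PySem.Dict.empty
  let hash :=
    str2.toList.foldl (fun d ch => if d.contains ch then d.modify ch 0 (· + 1) else d) hash
  hash.values.foldl (fun max_val count => if count > max_val then count else max_val) 0

-- ===== PORT B =====
def solution_alt (str1 : String) (str2 : String) : Int :=
  PySem.List.maxD
    ((PySem.Set.ofList str1.toList).map
      (fun ch => ((PySem.Str.count str2 (String.ofList [ch]) : Nat) : Int)))
    (fun x => x) 0

-- ===== PRECONDITION & SPEC =====
def Spec_solution (str1 : String) (str2 : String) (out : Int) : Prop := out = solution_alt str1 str2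
instance (str1 : String) (str2 : String) (out : Int) : Decidable (Spec_solution str1 str2 out) := by unfold Spec_solution; infer_instance

-- ===== CLAIM (what is proved, stated in full; the proofs are below) =====
def Claim_equal_solution : Prop := ∀ (str1 : String) (str2 : String), Dom_solution str1 str2 → Spec_solution str1 str2 (solution str1 str2)

-- ===== LEMMAS AND PROOFS =====

-- str2.count(ch) for a single character: the counting recursion equals List.count
lemma count_go_singleton (c : Char) :
    ∀ (fuel : Nat) (s : List Char) (acc : Nat), s.length ≤ fuel →
      PySem.Chars.count.go [c] fuel s acc = acc + s.count c := by
  intro fuel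
  induction fuel with
  | zero => intro s acc h; simp at h; simp [h, PySem.Chars.count.go]
  | succ n ih =>
    intro s acc h
    cases s with
    | nil => simp [PySem.Chars.count.go]
    | cons x t =>
      rw [PySem.Chars.count.go]
      by_cases hx : c = x
      · subst hx
        simp [List.isPrefixOf, ih t (acc + 1) (by simpa using h)]
        omega
      · simp [List.isPrefixOf, hx, ih t acc (by simpa using h), Ne.symm hx]

lemma count_singleton (s2 : String) (c : Char) :
    PySem.Str.count s2 (String.ofList [c]) = s2.toList.count c := by
  simp [PySem.Str.count, PySem.Chars.count]
  rw [count_go_singleton c s2.length s2.toList 0 (by simp)]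
  simp

-- first match in a key-value list built from a key list g
lemma find_self (c : Char) : ∀ (g : List Char), c ∈ g → List.find? (fun k => k == c) g = some c := by
  intro g hm
  induction g with
  | nil => simp at hm
  | cons a t ih =>
    by_cases h : a = c
    · simp [h]
    · simp [h] at hm ⊢
      exact ih (by tauto)

lemma getD_map_keys (g : List Char) (v : Char → Int) (c : Char) (hm : c ∈ g) :
    (PySem.Dict.mk (g.map (fun k => (k, v k)))).getD c 0 = v c := by
  simp only [PySem.Dict.getD, PySem.Dict.get?, List.find?_map]
  have : ((fun p => p.1 == c) ∘ fun k => ((k : Char), v k)) = (fun k => k == c) := rfl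
  rw [this, find_self c g hm]
  rfl

-- A's first loop: inserting 0 for every character of l turns the zero dict over g into the zero dict over Set.update g l
lemma loop1 (l : List Char) :
    ∀ (g : List Char),
      (l.foldl (fun d ch => d.insert ch 0) (PySem.Dict.mk (g.map (fun k => (k, (0:Int))))))
        = PySem.Dict.mk ((PySem.Set.update g l).map (fun k => (k, (0:Int)))) := by
  induction l with
  | nil => intro g; simp [PySem.Set.update]
  | cons c t ih =>
    intro g
    simp only [List.foldl_cons]
    by_cases hm : c ∈ g
    · have h1 : (PySem.Dict.mk (g.map (fun k => (k, (0:Int))))).insert c 0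
          = PySem.Dict.mk (g.map (fun k => (k, (0:Int)))) := by
        simp only [PySem.Dict.insert, PySem.Dict.contains, List.any_map]
        simp [hm]
        exact fun a _ h => h.symm
      have h2 : PySem.Set.add g c = g := by simp [PySem.Set.add, PySem.Set.contains, hm]
      rw [h1, ih g]
      simp [PySem.Set.update, h2]
    · have h1 : (PySem.Dict.mk (g.map (fun k => (k, (0:Int))))).insert c 0
          = PySem.Dict.mk ((g ++ [c]).map (fun k => (k, (0:Int)))) := by
        simp only [PySem.Dict.insert, PySem.Dict.contains, List.any_map]
        simp [hm]
      have h2 : PySem.Set.add g c = g ++ [c] := by simp [PySem.Set.add, PySem.Set.contains, hm]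
      rw [h1, ih (g ++ [c])]
      simp [PySem.Set.update, h2]

-- A's second loop: the guarded counting loop adds l.count k to each stored value, keys unchanged
lemma loop2 (l : List Char) :
    ∀ (g : List Char) (v : Char → Int),
      (l.foldl (fun d ch => if d.contains ch then d.modify ch 0 (· + 1) else d)
          (PySem.Dict.mk (g.map (fun k => (k, v k)))))
        = PySem.Dict.mk (g.map (fun k => (k, v k + l.count k))) := by
  induction l with
  | nil => intro g v; simp
  | cons c t ih =>
    intro g v
    simp only [List.foldl_cons]
    by_cases hm : c ∈ g
    · have hcon : (PySem.Dict.mk (g.map (fun k => (k, v k)))).contains c = true := by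
        simp [PySem.Dict.contains, List.any_map, hm]
      have h1 : (if (PySem.Dict.mk (g.map (fun k => (k, v k)))).contains c
            then (PySem.Dict.mk (g.map (fun k => (k, v k)))).modify c 0 (· + 1)
            else (PySem.Dict.mk (g.map (fun k => (k, v k)))))
          = PySem.Dict.mk (g.map (fun k => (k, if k = c then v c + 1 else v k))) := by
        rw [if_pos hcon]
        simp only [PySem.Dict.modify, getD_map_keys g v c hm, PySem.Dict.insert,
          PySem.Dict.contains, List.any_map]
        simp [hm, List.map_map]
        intro a _
        by_cases h : a = c <;> simp [h]
      rw [h1, ih g (fun k => if k = c then v c + 1 else v k)]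
      congr 1
      refine List.map_congr_left (fun k hk => ?_)
      by_cases hkc : k = c
      · simp only [hkc, List.count_cons_self]
        push_cast
        ring_nf
      · simp [hkc, Ne.symm hkc]
    · have hcon : (PySem.Dict.mk (g.map (fun k => (k, v k)))).contains c = false := by
        simp [PySem.Dict.contains, List.any_map]
        exact fun x hx h => hm (h ▸ hx)
      rw [if_neg (by simp [hcon]), ih g v]
      congr 1
      exact List.map_congr_left (fun k hk => by
        have hkc : k ≠ c := fun h => hm (h ▸ hk)
        simp [hkc.symm])

-- A's running-max loop over nonnegative values equals max(..., default=0)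
lemma foldmax (xs : List Int) (h : ∀ x ∈ xs, 0 ≤ x) :
    xs.foldl (fun max_val count => if count > max_val then count else max_val) 0
      = PySem.List.maxD xs (fun x => x) 0 := by
  cases xs with
  | nil => rfl
  | cons y t =>
    simp only [PySem.List.maxD, PySem.List.max?, List.foldl_cons]
    have hy : 0 ≤ y := h y (by simp)
    have h0 : (if y > (0:Int) then y else 0) = y := by omega
    rw [h0]
    clear h hy h0
    induction t generalizing y with
    | nil => rfl
    | cons x s ih =>
      simp only [List.foldl_cons]
      by_cases h : y < x
      · have hx : (if x > y then x else y) = x := by omega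
        rw [hx, if_pos h, ih x]
      · have hx : (if x > y then x else y) = y := by omega
        rw [hx, if_neg h, ih y]

-- ===== VERDICT (by name: the statement is the Claim_ definition above) =====
theorem solution_spec : Claim_equal_solution := by
  intro str1 str2 _
  unfold Spec_solution solution solution_alt
  have h0 : (PySem.Dict.empty : PySem.Dict Char Int)
      = PySem.Dict.mk (([]:List Char).map (fun k => (k, (0:Int)))) := rfl
  rw [h0, loop1 str1.toList []]
  have hupd : PySem.Set.update ([]:List Char) str1.toList = PySem.Set.ofList str1.toList := by
    simp [pysem]
  dsimp only
  rw [hupd, loop2 str2.toList _ (fun _ => (0:Int))]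
  simp only [PySem.Dict.values, List.map_map, zero_add, count_singleton]
  exact foldmax _ (by
    intro x hx
    simp only [List.mem_map] at hx
    obtain ⟨c, _, rfl⟩ := hx
    exact Int.natCast_nonneg _)
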